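-- pv_equiv track=rewrite | github.com/Mountain-Michaelle/momoduxp- | backend/shared/database.py | _to_psycopg2_url
-- ===== SOURCE A (Python) =====
-- def _to_psycopg2_url(url: str) -> str:
--     """Normalise any postgres:// variant to postgresql+psycopg2://."""
--     for prefix, replacement in (
--         ("postgresql+asyncpg://", "postgresql+psycopg2://"),
--         ("postgresql+psycopg2://", "postgresql+psycopg2://"),
--         ("postgresql://", "postgresql+psycopg2://"),
--         ("postgres://", "postgresql+psycopg2://"),
--     ):
--         if url.startswith(prefix):
--             return url.replace(prefix, replacement, 1)
--     return url
-- ===== SOURCE B (Python) =====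
-- def _eat(url: str, i: int, lit: str):
--     """Return the cursor after literal lit if url carries it at position i, else None."""
--     j = i + len(lit)
--     return j if url[i:j] == lit else None
--
--
-- def _to_psycopg2_url(url: str) -> str:
--     """Normalise any postgres:// variant to postgresql+psycopg2://.
--
--     Single left-to-right cursor parse of the factored scheme grammar
--     "postgres" ("ql" ("+asyncpg" | "+psycopg2")?)? "://": each optional
--     component starts with a character "://" cannot start with, so the
--     greedy parse is deterministic and recognises exactly the four prefixes.
--     """
--     i = _eat(url, 0, "postgres")
--     if i is None:
--         return url
--     j = _eat(url, i, "ql")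
--     if j is not None:
--         i = j
--         for driver in ("+asyncpg", "+psycopg2"):
--             k = _eat(url, i, driver)
--             if k is not None:
--                 i = k
--                 break
--     end = _eat(url, i, "://")
--     if end is None:
--         return url
--     return "postgresql+psycopg2://" + url[end:]
-- ===== Notes on version B (the rewrite author's own statement) =====
-- stated objective: alternative
-- what changed: Replaces A's four independent whole-prefix startswith/replace(...,1) probes by a single left-to-right cursor parse of the factored scheme grammar "postgres" ("ql" ("+asyncpg"|"+psycopg2")?)? "://", advancing one index and consuming each optional component greedily (deterministic since every optional component starts with a character "://" cannot).
import Mathlib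
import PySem

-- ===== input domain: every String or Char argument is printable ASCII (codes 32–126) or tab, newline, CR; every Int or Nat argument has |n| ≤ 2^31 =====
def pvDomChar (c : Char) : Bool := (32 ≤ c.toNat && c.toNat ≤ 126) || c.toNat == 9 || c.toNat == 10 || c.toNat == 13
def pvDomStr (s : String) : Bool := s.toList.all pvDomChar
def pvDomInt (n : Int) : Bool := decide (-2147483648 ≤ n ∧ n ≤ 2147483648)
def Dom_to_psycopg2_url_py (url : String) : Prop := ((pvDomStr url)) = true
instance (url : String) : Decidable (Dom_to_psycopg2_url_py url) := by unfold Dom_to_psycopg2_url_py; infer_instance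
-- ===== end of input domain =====

-- B replaces A's four whole-prefix startswith/replace probes by one cursor parse
-- of the factored scheme grammar "postgres" ("ql" ("+asyncpg"|"+psycopg2")?)? "://"
-- (alternative decomposition; same cost).

-- ===== PORT A =====
-- split l around the FIRST occurrence of pat: some (before, after), none if absent
-- (exact: this is how str.replace(old, new, 1) locates the occurrence)
def pvFindSplit (pat : List Char) : List Char → Option (List Char × List Char)
  | [] => if pat.isPrefixOf ([] : List Char) then some ([], []) else none
  | c :: rest =>
    if pat.isPrefixOf (c :: rest) then some ([], (c :: rest).drop pat.length)
    else match pvFindSplit pat rest with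
      | some (a, b) => some (c :: a, b)
      | none => none

-- exact port of Python's l.replace(pat, rep, 1): replace only the first occurrence
def pvReplace1 (pat rep l : List Char) : List Char :=
  match pvFindSplit pat l with
  | some (a, b) => a ++ rep ++ b
  | none => l

-- A's loop over the literal 4-tuple of (prefix, replacement) pairs, unrolled in order
def to_psycopg2_url_py (url : String) : String :=
  if ("postgresql+asyncpg://".toList).isPrefixOf url.toList then
    String.ofList (pvReplace1 "postgresql+asyncpg://".toList "postgresql+psycopg2://".toList url.toList)
  else if ("postgresql+psycopg2://".toList).isPrefixOf url.toList then
    String.ofList (pvReplace1 "postgresql+psycopg2://".toList "postgresql+psycopg2://".toList url.toList)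
  else if ("postgresql://".toList).isPrefixOf url.toList then
    String.ofList (pvReplace1 "postgresql://".toList "postgresql+psycopg2://".toList url.toList)
  else if ("postgres://".toList).isPrefixOf url.toList then
    String.ofList (pvReplace1 "postgres://".toList "postgresql+psycopg2://".toList url.toList)
  else url

-- ===== PORT B =====
-- _eat(url, i, lit): cursor after lit if url carries it at position i, else None.
-- (exact: Python's url[i:i+len(lit)] == lit, for 0 ≤ i, is lit.isPrefixOf (drop i))
def pvEat (l : List Char) (i : Nat) (lit : List Char) : Option Nat :=
  if lit.isPrefixOf (l.drop i) then some (i + lit.length) else none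

-- B: one cursor parse of "postgres" ("ql" ("+asyncpg"|"+psycopg2")?)? "://"
def to_psycopg2_url_py_alt (url : String) : String :=
  let l := url.toList
  match pvEat l 0 "postgres".toList with
  | none => url
  | some i0 =>
    -- optional "ql", then (inside it) optionally one driver tag, tried in order
    let i1 :=
      match pvEat l i0 "ql".toList with
      | none => i0
      | some j =>
        match pvEat l j "+asyncpg".toList with
        | some k => k
        | none =>
          match pvEat l j "+psycopg2".toList with
          | some k => k
          | none => j
    match pvEat l i1 "://".toList with
    | none => url
    | some e => String.ofList ("postgresql+psycopg2://".toList ++ l.drop e)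

-- ===== PRECONDITION & SPEC =====
def Spec_to_psycopg2_url_py (url : String) (out : String) : Prop := out = to_psycopg2_url_py_alt url
instance (url : String) (out : String) : Decidable (Spec_to_psycopg2_url_py url out) := by unfold Spec_to_psycopg2_url_py; infer_instance

-- ===== CLAIM (what is proved, stated in full; the proofs are below) =====
def Claim_equal_to_psycopg2_url_py : Prop := ∀ (url : String), Dom_to_psycopg2_url_py url → Spec_to_psycopg2_url_py url (to_psycopg2_url_py url)

-- ===== LEMMAS AND PROOFS =====

theorem pvFindSplit_prefix {pat l : List Char} (h : pat.isPrefixOf l = true) :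
    pvFindSplit pat l = some ([], l.drop pat.length) := by
  cases l <;> simp [pvFindSplit, h]

theorem pvReplace1_of_prefix {pat l : List Char} (rep : List Char)
    (h : pat.isPrefixOf l = true) :
    pvReplace1 pat rep l = rep ++ l.drop pat.length := by
  simp [pvReplace1, pvFindSplit_prefix h]

theorem pvEat_some {l lit : List Char} {i j : Nat} (h : pvEat l i lit = some j) :
    j = i + lit.length ∧ lit.isPrefixOf (l.drop i) = true := by
  by_cases hp : lit.isPrefixOf (l.drop i) = true
  · simp [pvEat, hp] at h; exact ⟨h.symm, hp⟩
  · simp [pvEat, hp] at h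

-- gluing cursor steps back into one prefix
theorem prefix_chain {x y l : List Char}
    (hx : x.isPrefixOf l = true) (hy : y.isPrefixOf (l.drop x.length) = true) :
    (x ++ y).isPrefixOf l = true := by
  rcases List.isPrefixOf_iff_prefix.mp hx with ⟨t, ht⟩
  have hdrop : l.drop x.length = t := by rw [← ht]; simp
  rcases List.isPrefixOf_iff_prefix.mp (hdrop ▸ hy) with ⟨t', ht'⟩
  exact List.isPrefixOf_iff_prefix.mpr ⟨t', by rw [← ht, ← ht']; simp⟩

-- ===== VERDICT (by name: the statement is the Claim_ definition above) =====
theorem to_psycopg2_url_py_spec : Claim_equal_to_psycopg2_url_py := by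
  intro url _
  unfold Spec_to_psycopg2_url_py to_psycopg2_url_py to_psycopg2_url_py_alt
  by_cases h1 : ("postgresql+asyncpg://".toList).isPrefixOf url.toList = true
  · rcases List.isPrefixOf_iff_prefix.mp h1 with ⟨r, hr⟩
    rw [if_pos h1, pvReplace1_of_prefix _ h1, ← hr]
    simp [pvEat, List.isPrefixOf]
  · rw [if_neg h1]
    by_cases h2 : ("postgresql+psycopg2://".toList).isPrefixOf url.toList = true
    · rcases List.isPrefixOf_iff_prefix.mp h2 with ⟨r, hr⟩
      rw [if_pos h2, pvReplace1_of_prefix _ h2, ← hr]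
      simp [pvEat, List.isPrefixOf]
    · rw [if_neg h2]
      by_cases h3 : ("postgresql://".toList).isPrefixOf url.toList = true
      · rcases List.isPrefixOf_iff_prefix.mp h3 with ⟨r, hr⟩
        rw [if_pos h3, pvReplace1_of_prefix _ h3, ← hr]
        simp [pvEat, List.isPrefixOf]
      · rw [if_neg h3]
        by_cases h4 : ("postgres://".toList).isPrefixOf url.toList = true
        · rcases List.isPrefixOf_iff_prefix.mp h4 with ⟨r, hr⟩
          rw [if_pos h4, pvReplace1_of_prefix _ h4, ← hr]
          simp [pvEat, List.isPrefixOf]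
        · rw [if_neg h4]
          -- no prefix matches: show the cursor parse cannot reach "://"
          simp only [show "postgres".toList = ['p','o','s','t','g','r','e','s'] from rfl,
            show "ql".toList = ['q','l'] from rfl,
            show "+asyncpg".toList = ['+','a','s','y','n','c','p','g'] from rfl,
            show "+psycopg2".toList = ['+','p','s','y','c','o','p','g','2'] from rfl,
            show "://".toList = [':','/','/'] from rfl]
          cases hA : pvEat url.toList 0 ['p','o','s','t','g','r','e','s'] with
          | none => rfl
          | some i0 =>
            obtain ⟨rfl, hpre⟩ := pvEat_some hA
            cases hQ : pvEat url.toList (0 + List.length ['p','o','s','t','g','r','e','s']) ['q','l'] with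
            | none =>
              cases hE : pvEat url.toList (0 + List.length ['p','o','s','t','g','r','e','s']) [':','/','/'] with
              | none => simp only [hQ, hE]
              | some e =>
                exfalso
                obtain ⟨_, hsep⟩ := pvEat_some hE
                have : (['p','o','s','t','g','r','e','s'] ++ [':','/','/']).isPrefixOf url.toList = true :=
                  prefix_chain (by simpa using hpre) (by simpa using hsep)
                exact h4 (by simpa using this)
            | some j =>
              obtain ⟨rfl, hq⟩ := pvEat_some hQ
              have hpq : (['p','o','s','t','g','r','e','s'] ++ ['q','l']).isPrefixOf url.toList = true :=
                prefix_chain (by simpa using hpre) (by simpa using hq)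
              cases hA8 : pvEat url.toList (0 + List.length ['p','o','s','t','g','r','e','s'] + List.length ['q','l']) ['+','a','s','y','n','c','p','g'] with
              | some k =>
                obtain ⟨rfl, ha⟩ := pvEat_some hA8
                have hpa : ((['p','o','s','t','g','r','e','s'] ++ ['q','l']) ++ ['+','a','s','y','n','c','p','g']).isPrefixOf url.toList = true :=
                  prefix_chain hpq (by simpa using ha)
                cases hE : pvEat url.toList (0 + List.length ['p','o','s','t','g','r','e','s'] + List.length ['q','l'] + List.length ['+','a','s','y','n','c','p','g']) [':','/','/'] with
                | none => simp only [hQ, hA8, hE]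
                | some e =>
                  exfalso
                  obtain ⟨_, hsep⟩ := pvEat_some hE
                  have : (((['p','o','s','t','g','r','e','s'] ++ ['q','l']) ++ ['+','a','s','y','n','c','p','g']) ++ [':','/','/']).isPrefixOf url.toList = true :=
                    prefix_chain hpa (by simpa using hsep)
                  exact h1 (by simpa using this)
              | none =>
                cases hP9 : pvEat url.toList (0 + List.length ['p','o','s','t','g','r','e','s'] + List.length ['q','l']) ['+','p','s','y','c','o','p','g','2'] with
                | some k =>
                  obtain ⟨rfl, hp⟩ := pvEat_some hP9
                  have hpp : ((['p','o','s','t','g','r','e','s'] ++ ['q','l']) ++ ['+','p','s','y','c','o','p','g','2']).isPrefixOf url.toList = true :=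
                    prefix_chain hpq (by simpa using hp)
                  cases hE : pvEat url.toList (0 + List.length ['p','o','s','t','g','r','e','s'] + List.length ['q','l'] + List.length ['+','p','s','y','c','o','p','g','2']) [':','/','/'] with
                  | none => simp only [hQ, hA8, hP9, hE]
                  | some e =>
                    exfalso
                    obtain ⟨_, hsep⟩ := pvEat_some hE
                    have : (((['p','o','s','t','g','r','e','s'] ++ ['q','l']) ++ ['+','p','s','y','c','o','p','g','2']) ++ [':','/','/']).isPrefixOf url.toList = true :=
                      prefix_chain hpp (by simpa using hsep)
                    exact h2 (by simpa using this)
                | none =>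
                  cases hE : pvEat url.toList (0 + List.length ['p','o','s','t','g','r','e','s'] + List.length ['q','l']) [':','/','/'] with
                  | none => simp only [hQ, hA8, hP9, hE]
                  | some e =>
                    exfalso
                    obtain ⟨_, hsep⟩ := pvEat_some hE
                    have : ((['p','o','s','t','g','r','e','s'] ++ ['q','l']) ++ [':','/','/']).isPrefixOf url.toList = true :=
                      prefix_chain hpq (by simpa using hsep)
                    exact h3 (by simpa using this)
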